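-- pv_equiv track=rewrite | github.com/huang-laboratory/EM2NA | test_ss.py | matrix_to_dbn
-- ===== SOURCE A (Python) =====
-- def find_non_conflicting_brackets(pair_list, bracket_types):
--     """
--     对于每一对配对，找到一个不产生矛盾的括号表示。
--     """
--     # 初始化配对的括号类型
--     pair_bracket_map = {}
--     for i, j in pair_list:
--         for left_bracket, right_bracket in bracket_types:
--             # 检查当前括号是否产生矛盾
--             conflict = False
--             for k, l in pair_list:
--                 if i < k < j < l or k < i < l < j:
--                     # 存在交叉配对，检查是否已经使用了当前的括号类型
--                     if pair_bracket_map.get((k, l), (None, None)) == (left_bracket, right_bracket):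
--                         conflict = True
--                         break
--             if not conflict:
--                 pair_bracket_map[(i, j)] = (left_bracket, right_bracket)
--                 break
--     return pair_bracket_map
--
-- def matrix_to_dbn(pair_matrix):
--     """
--     将二维配对矩阵转换为RNA二级结构的DBN格式，处理交叉配对情况。
--     """
--     n = len(pair_matrix)
--     dbn_list = ['.'] * n
--     pair_list = [(i, j) for i in range(n) for j in range(i+1, n) if pair_matrix[i][j] == 1]
--     bracket_types = [('(', ')'), ('[', ']'), ('{', '}'), ('<', '>'),
--                      ('A', 'a'), ('B', 'b'), ('C', 'c'), ('D', 'd')]  # 可以根据需要添加更多类型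
--
--     pair_bracket_map = find_non_conflicting_brackets(pair_list, bracket_types)
--
--     for (i, j), (left_bracket, right_bracket) in pair_bracket_map.items():
--         dbn_list[i] = left_bracket
--         dbn_list[j] = right_bracket
--
--     return ''.join(dbn_list)
-- ===== SOURCE B (Python) =====
-- def matrix_to_dbn(pair_matrix):
--     n = len(pair_matrix)
--     pair_list = [(i, j) for i in range(n) for j in range(i + 1, n) if pair_matrix[i][j] == 1]
--     bracket_types = [('(', ')'), ('[', ']'), ('{', '}'), ('<', '>'),
--                      ('A', 'a'), ('B', 'b'), ('C', 'c'), ('D', 'd')]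
--     # Peel one non-crossing layer per bracket type: 8 staged passes instead of
--     # per-pair first-fit over brackets.
--     bracket_of = {}
--     remaining = pair_list
--     for br in bracket_types:
--         layer = []
--         rest = []
--         for i, j in remaining:
--             if any(i < k < j < l or k < i < l < j for k, l in layer):
--                 rest.append((i, j))
--             else:
--                 layer.append((i, j))
--                 bracket_of[(i, j)] = br
--         remaining = rest
--     dbn_list = ['.'] * n
--     for i, j in pair_list:
--         if (i, j) in bracket_of:
--             left_bracket, right_bracket = bracket_of[(i, j)]
--             dbn_list[i] = left_bracket
--             dbn_list[j] = right_bracket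
--     return ''.join(dbn_list)
-- ===== Notes on version B (the rewrite author's own statement) =====
-- stated objective: alternative
-- what changed: B inverts the loop nesting: instead of A's per-pair first-fit over the 8 bracket types against a growing dict, B makes 8 staged passes, one per bracket type, each peeling from the remaining pairs the greedy non-crossing layer and stamping that bracket on the whole layer (first-fit greedy colouring = iterated extraction of the lexicographically-first non-crossing layer), then fills the dbn list in one final lookup pass.
import Mathlib
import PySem

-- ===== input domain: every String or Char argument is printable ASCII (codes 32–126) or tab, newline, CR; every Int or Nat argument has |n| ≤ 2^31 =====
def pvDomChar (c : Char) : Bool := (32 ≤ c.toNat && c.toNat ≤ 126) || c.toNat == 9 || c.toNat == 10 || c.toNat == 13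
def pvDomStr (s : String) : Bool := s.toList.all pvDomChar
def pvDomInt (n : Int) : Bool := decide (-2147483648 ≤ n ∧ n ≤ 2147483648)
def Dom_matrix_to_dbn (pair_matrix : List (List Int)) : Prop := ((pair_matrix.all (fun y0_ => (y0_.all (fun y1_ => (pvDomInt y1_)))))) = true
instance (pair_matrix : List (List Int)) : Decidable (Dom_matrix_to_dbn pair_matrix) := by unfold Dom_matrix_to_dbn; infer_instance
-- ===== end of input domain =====

-- B inverts the loop nesting: one staged pass per bracket type, peeling the greedy non-crossing
-- layer of the remaining pairs, instead of A's per-pair first-fit over brackets (objective: alternative).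

-- Shared helpers (both Pythons contain the identical pair-list comprehension, crossing test and bracket table).
def pvCross (p q : Int × Int) : Bool :=
  decide (p.1 < q.1 ∧ q.1 < p.2 ∧ p.2 < q.2) || decide (q.1 < p.1 ∧ p.1 < q.2 ∧ q.2 < p.2)

def pvBrackets : List (Char × Char) :=
  [('(', ')'), ('[', ']'), ('{', '}'), ('<', '>'), ('A', 'a'), ('B', 'b'), ('C', 'c'), ('D', 'd')]

-- [(i, j) for i in range(n) for j in range(i+1, n) if pair_matrix[i][j] == 1]
-- (indexing via pyGetD: in range under Pre_matrix_to_dbn)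
def pvPairList (m : List (List Int)) : List (Int × Int) :=
  let n : Int := PySem.List.len m
  (PySem.List.pyRange 0 n 1).flatMap (fun i =>
    ((PySem.List.pyRange (i + 1) n 1).filter
        (fun j => PySem.List.pyGetD (PySem.List.pyGetD m i []) j 0 == 1)).map (fun j => (i, j)))

-- ===== PORT A =====
-- pair_bracket_map.get((k,l), (None,None)) == (lb,rb): the (None,None) default never equals a
-- bracket pair, so the test is exactly 'get? q == some b'.
-- loop body of find_non_conflicting_brackets (named for the proofs below)
def pvStepA (bracket_types : List (Char × Char)) (pair_list : List (Int × Int))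
    (pair_bracket_map : PySem.Dict (Int × Int) (Char × Char)) (p : Int × Int) :
    PySem.Dict (Int × Int) (Char × Char) :=
  match bracket_types.find? (fun b =>
      ! pair_list.any (fun q => pvCross p q && (pair_bracket_map.get? q == some b))) with
  | some b => pair_bracket_map.insert p b
  | none => pair_bracket_map

def find_non_conflicting_brackets (pair_list : List (Int × Int))
    (bracket_types : List (Char × Char)) : PySem.Dict (Int × Int) (Char × Char) :=
  pair_list.foldl (pvStepA bracket_types pair_list) PySem.Dict.empty

-- body of A's final dbn-filling loop over the dict items
def pvFill (asg : List ((Int × Int) × (Char × Char))) (dbn0 : List Char) : List Char :=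
  asg.foldl (fun dbn e => PySem.List.pySetD (PySem.List.pySetD dbn e.1.1 e.2.1) e.1.2 e.2.2) dbn0

def matrix_to_dbn (pair_matrix : List (List Int)) : String :=
  let n : Int := PySem.List.len pair_matrix
  let dbn_list : List Char := List.replicate n.toNat '.'
  let pair_list := pvPairList pair_matrix
  let pair_bracket_map := find_non_conflicting_brackets pair_list pvBrackets
  String.ofList (pvFill pair_bracket_map.items dbn_list)

-- ===== PORT B =====
-- for br in bracket_types: peel the greedy non-crossing layer (layer/rest) of remaining,
-- recording bracket_of[(i,j)] = br for the layer; then one fill pass over pair_list.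
-- body of B's inner peel loop: p joins the layer (and gets bracket br) unless it crosses the layer
def pvBStep (br : Char × Char)
    (s : PySem.Dict (Int × Int) (Char × Char) × List (Int × Int) × List (Int × Int))
    (p : Int × Int) :
    PySem.Dict (Int × Int) (Char × Char) × List (Int × Int) × List (Int × Int) :=
  if s.2.1.any (fun q => pvCross p q) then (s.1, s.2.1, s.2.2 ++ [p])
  else (s.1.insert p br, s.2.1 ++ [p], s.2.2)

-- body of B's outer loop: peel one layer for bracket br, keep the dict and the rest
def pvOuter (st : PySem.Dict (Int × Int) (Char × Char) × List (Int × Int)) (br : Char × Char) :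
    PySem.Dict (Int × Int) (Char × Char) × List (Int × Int) :=
  let inner := st.2.foldl (pvBStep br) (st.1, ([] : List (Int × Int)), ([] : List (Int × Int)))
  (inner.1, inner.2.2)

-- body of B's final fill loop: if (i,j) in bracket_of: write its two characters
def pvFillStep (bracket_of : PySem.Dict (Int × Int) (Char × Char)) (dbn : List Char)
    (p : Int × Int) : List Char :=
  match bracket_of.get? p with
  | some b => PySem.List.pySetD (PySem.List.pySetD dbn p.1 b.1) p.2 b.2
  | none => dbn

def matrix_to_dbn_alt (pair_matrix : List (List Int)) : String :=
  let n : Int := PySem.List.len pair_matrix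
  let pair_list := pvPairList pair_matrix
  let res := pvBrackets.foldl pvOuter (PySem.Dict.empty, pair_list)
  String.ofList (pair_list.foldl (pvFillStep res.1) (List.replicate n.toNat '.'))

-- ===== PRECONDITION & SPEC =====
-- Pre_ = exactly where Python A returns: every row except possibly the last must have at least
-- n = len(pair_matrix) entries, else pair_matrix[i][j] raises IndexError in the comprehension.
def Pre_matrix_to_dbn (pair_matrix : List (List Int)) : Prop :=
  ∀ r ∈ pair_matrix.dropLast, pair_matrix.length ≤ r.length
instance (pair_matrix : List (List Int)) : Decidable (Pre_matrix_to_dbn pair_matrix) := by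
  unfold Pre_matrix_to_dbn; infer_instance

def pvWitness_matrix_to_dbn : List (List Int) := [[0, 1], [0, 0]]

def Spec_matrix_to_dbn (pair_matrix : List (List Int)) (out : String) : Prop := out = matrix_to_dbn_alt pair_matrix
instance (pair_matrix : List (List Int)) (out : String) : Decidable (Spec_matrix_to_dbn pair_matrix out) := by unfold Spec_matrix_to_dbn; infer_instance

-- ===== CLAIM (what is proved, stated in full; the proofs are below) =====
def Claim_equal_matrix_to_dbn : Prop := ∀ (pair_matrix : List (List Int)), Dom_matrix_to_dbn pair_matrix → Pre_matrix_to_dbn pair_matrix → Spec_matrix_to_dbn pair_matrix (matrix_to_dbn pair_matrix)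

-- ===== LEMMAS AND PROOFS =====

-- list-level greedy first-fit over a bracket list bs (the common abstraction)
def pvGStep (bs : List (Char × Char)) (asg : List ((Int × Int) × (Char × Char)))
    (p : Int × Int) : List ((Int × Int) × (Char × Char)) :=
  match bs.find? (fun b => ! asg.any (fun e => pvCross p e.1 && e.2 == b)) with
  | some b => asg ++ [(p, b)]
  | none => asg

-- B's inner-loop body (list level, without the dict)
def pvPeelStep (lr : List (Int × Int) × List (Int × Int)) (p : Int × Int) :
    List (Int × Int) × List (Int × Int) :=
  if lr.1.any (fun q => pvCross p q) then (lr.1, lr.2 ++ [p]) else (lr.1 ++ [p], lr.2)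

theorem pvPairList_nodup (m : List (List Int)) : (pvPairList m).Nodup := by
  unfold pvPairList
  rw [List.nodup_flatMap]
  constructor
  · intro i _
    exact ((PySem.List.nodup_pyRange_one _ _).filter _).map (fun a b h => by
      simpa using congrArg Prod.snd h)
  · apply List.Pairwise.imp ?_ (PySem.List.pairwise_lt_pyRange_one 0 (PySem.List.len m))
    intro a b hab x hxa hxb
    simp only [List.mem_map, List.mem_filter] at hxa hxb
    obtain ⟨j1, _, h1⟩ := hxa
    obtain ⟨j2, _, h2⟩ := hxb
    have hab2 : a = b := by rw [← h1] at h2; exact (congrArg Prod.fst h2).symm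
    omega

-- small association-list lemmas
theorem pvLookup_of_mem {α β : Type} [BEq α] [LawfulBEq α] (l : List (α × β)) (p : α) (b : β)
    (hmem : (p, b) ∈ l) (hnd : (l.map Prod.fst).Nodup) : List.lookup p l = some b := by
  induction l with
  | nil => cases hmem
  | cons e t ih =>
    rcases List.mem_cons.mp hmem with h | h
    · subst h; simp [List.lookup]
    · have hne : e.1 ≠ p := by
        intro hep
        exact (List.nodup_cons.mp hnd).1 (hep ▸ List.mem_map.mpr ⟨(p, b), h, rfl⟩)
      obtain ⟨k, v⟩ := e
      have hpk : (p == k) = false := by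
        simp only [beq_eq_false_iff_ne]; exact fun hq => hne (by simp [hq])
      simp only [List.lookup, hpk]
      exact ih h (List.nodup_cons.mp hnd).2

theorem pvLookup_none {α β : Type} [BEq α] [LawfulBEq α] (l : List (α × β)) (p : α)
    (h : p ∉ l.map Prod.fst) : List.lookup p l = none := by
  induction l with
  | nil => rfl
  | cons e t ih =>
    obtain ⟨k, v⟩ := e
    simp only [List.map_cons, List.mem_cons] at h
    push Not at h
    have hpk : (p == k) = false := by
      simp only [beq_eq_false_iff_ne]; exact fun hq => h.1 hq
    simp only [List.lookup, hpk]
    exact ih h.2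

theorem pvLookup_filter {α β : Type} [BEq α] [LawfulBEq α] (l : List (α × β)) (p : α)
    (q : α × β → Bool) (h : ∀ c, (p, c) ∈ l → q (p, c) = true) :
    List.lookup p (l.filter q) = List.lookup p l := by
  induction l with
  | nil => rfl
  | cons e t ih =>
    have ih' := ih (fun c hc => h c (List.mem_cons_of_mem _ hc))
    obtain ⟨k, v⟩ := e
    by_cases hk : k = p
    · subst hk
      rw [List.filter_cons_of_pos (h v List.mem_cons_self)]
      simp [List.lookup]
    · have hpk : (p == k) = false := by
        simp only [beq_eq_false_iff_ne]; exact fun hq => hk hq.symm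
      cases hq : q (k, v)
      · rw [List.filter_cons_of_neg (by simp [hq])]
        simp only [List.lookup, hpk, ih']
      · rw [List.filter_cons_of_pos hq]
        simp only [List.lookup, hpk, ih']

theorem pvAny_filter_of {α : Type} (l : List α) (g q : α → Bool)
    (h : ∀ e ∈ l, q e = false → g e = false) : (l.filter q).any g = l.any g := by
  induction l with
  | nil => rfl
  | cons e t ih =>
    have ih' := ih (fun x hx => h x (List.mem_cons_of_mem _ hx))
    cases hq : q e
    · rw [List.filter_cons_of_neg (by simp [hq])]
      simp [List.any_cons, h e List.mem_cons_self hq, ih']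
    · rw [List.filter_cons_of_pos hq]
      simp [List.any_cons, ih']

theorem pvFind?_congr {α : Type} (l : List α) (f g : α → Bool) (h : ∀ b ∈ l, f b = g b) :
    l.find? f = l.find? g := by
  induction l with
  | nil => rfl
  | cons e t ih =>
    rw [List.find?_cons, List.find?_cons, h e List.mem_cons_self,
      ih (fun b hb => h b (List.mem_cons_of_mem _ hb))]

-- c0 conversion: the b0-conflict test over asg is the crossing test over the layer
theorem pvLayerAny (asg : List ((Int × Int) × (Char × Char))) (p : Int × Int) (b0 : Char × Char) :
    ((asg.filter (fun e => e.2 == b0)).map Prod.fst).any (fun q => pvCross p q)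
      = asg.any (fun e => pvCross p e.1 && e.2 == b0) := by
  induction asg with
  | nil => rfl
  | cons e t ih =>
    cases hq : (e.2 == b0)
    · simp [hq, List.any_cons, ih]
    · simp [hq, List.any_cons, ih]

-- A's dict-conflict test equals the items-level test
theorem pvSelectA (ps : List (Int × Int)) (d : PySem.Dict (Int × Int) (Char × Char))
    (p : Int × Int) (b : Char × Char) (hnd : d.keys.Nodup) (hsub : ∀ e ∈ d.items, e.1 ∈ ps) :
    ps.any (fun q => pvCross p q && (d.get? q == some b))
      = d.items.any (fun e => pvCross p e.1 && e.2 == b) := by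
  rw [Bool.eq_iff_iff]
  simp only [List.any_eq_true, Bool.and_eq_true, beq_iff_eq]
  constructor
  · rintro ⟨q, _, hc, hget⟩
    exact ⟨(q, b), PySem.Dict.mem_items_of_get?_eq_some d hget, hc, rfl⟩
  · rintro ⟨⟨k, v⟩, he, hc, hb⟩
    subst hb
    exact ⟨k, hsub _ he, hc, PySem.Dict.get?_of_mem_items d he hnd⟩

-- A's fold over the dict is the list-level greedy
theorem pvAEq (ps : List (Int × Int)) :
    ∀ (todo : List (Int × Int)) (d : PySem.Dict (Int × Int) (Char × Char)),
      todo.Nodup → (∀ q ∈ todo, q ∈ ps) → d.keys.Nodup →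
      (∀ e ∈ d.items, e.1 ∈ ps) → (∀ q ∈ todo, d.contains q = false) →
      (todo.foldl (pvStepA pvBrackets ps) d).items = todo.foldl (pvGStep pvBrackets) d.items := by
  intro todo
  induction todo with
  | nil => intro d _ _ _ _ _; rfl
  | cons p rest ih =>
    intro d hnd hps hk hs hfresh
    have hsel : (fun b => ! ps.any (fun q => pvCross p q && (d.get? q == some b)))
        = (fun b => ! d.items.any (fun e => pvCross p e.1 && e.2 == b)) :=
      funext fun b => by rw [pvSelectA ps d p b hk hs]
    have hnc : d.contains p = false := hfresh p List.mem_cons_self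
    have hstep : pvStepA pvBrackets ps d p = match pvBrackets.find? (fun b =>
        ! d.items.any (fun e => pvCross p e.1 && e.2 == b)) with
      | some b => d.insert p b
      | none => d := by unfold pvStepA; rw [hsel]
    rw [List.foldl_cons, List.foldl_cons, hstep]
    rcases hfind : pvBrackets.find? (fun b =>
        ! d.items.any (fun e => pvCross p e.1 && e.2 == b)) with _ | b
    · have hgs : pvGStep pvBrackets d.items p = d.items := by
        simp only [pvGStep, hfind]
      rw [hgs]
      show (List.foldl (pvStepA pvBrackets ps) d rest).items = _
      exact ih d (List.nodup_cons.mp hnd).2 (fun q hq => hps q (List.mem_cons_of_mem _ hq))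
        hk hs (fun q hq => hfresh q (List.mem_cons_of_mem _ hq))
    · have hgs : pvGStep pvBrackets d.items p = d.items ++ [(p, b)] := by
        simp only [pvGStep, hfind]
      rw [hgs, ← PySem.Dict.items_insert_of_not_contains d b hnc]
      show (List.foldl (pvStepA pvBrackets ps) (d.insert p b) rest).items = _
      apply ih
      · exact (List.nodup_cons.mp hnd).2
      · exact fun q hq => hps q (List.mem_cons_of_mem _ hq)
      · exact PySem.Dict.nodup_keys_insert d p b hk
      · intro e he
        have he' : e ∈ d.items ++ [(p, b)] :=
          PySem.Dict.items_insert_of_not_contains d b hnc ▸ he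
        rcases List.mem_append.mp he' with h | h
        · exact hs e h
        · rw [List.mem_singleton.mp h]; exact hps p List.mem_cons_self
      · intro q hq
        rw [PySem.Dict.contains_insert]
        have hqp : (q == p) = false := by
          simp only [beq_eq_false_iff_ne]
          exact fun hqp => (List.nodup_cons.mp hnd).1 (hqp ▸ hq)
        rw [hqp, hfresh q (List.mem_cons_of_mem _ hq)]; rfl

-- greedy keys form a sublist of the processed pairs
theorem pvGKeys (bs : List (Char × Char)) :
    ∀ (todo : List (Int × Int)) (asg : List ((Int × Int) × (Char × Char))),
      ((todo.foldl (pvGStep bs) asg).map Prod.fst).Sublist (asg.map Prod.fst ++ todo) := by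
  intro todo
  induction todo with
  | nil => intro asg; simp
  | cons p rest ih =>
    intro asg
    rw [List.foldl_cons]
    rcases hfind : bs.find? (fun b => ! asg.any (fun e => pvCross p e.1 && e.2 == b)) with _ | b
    · have hgs : pvGStep bs asg p = asg := by simp only [pvGStep, hfind]
      rw [hgs]
      refine (ih asg).trans ?_
      refine List.Sublist.append (List.Sublist.refl _) (List.sublist_cons_self _ _)
    · have hgs : pvGStep bs asg p = asg ++ [(p, b)] := by simp only [pvGStep, hfind]
      rw [hgs]
      refine (ih (asg ++ [(p, b)])).trans ?_
      rw [List.map_append]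
      simp

-- the peel only appends, and the new layer/rest elements partition todo
theorem pvPeelPerm :
    ∀ (todo layer rest : List (Int × Int)),
      ∃ L R, todo.foldl pvPeelStep (layer, rest) = (layer ++ L, rest ++ R)
        ∧ (L ++ R).Perm todo := by
  intro todo
  induction todo with
  | nil => intro layer rest; exact ⟨[], [], by simp, List.Perm.refl _⟩
  | cons p t ih =>
    intro layer rest
    rw [List.foldl_cons]
    cases hc : layer.any (fun q => pvCross p q)
    · have hstep : pvPeelStep (layer, rest) p = (layer ++ [p], rest) := by
        simp [pvPeelStep, hc]
      rw [hstep]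
      obtain ⟨L, R, heq, hperm⟩ := ih (layer ++ [p]) rest
      refine ⟨p :: L, R, by rw [heq]; simp, ?_⟩
      simp only [List.cons_append]
      exact List.Perm.cons p hperm
    · have hstep : pvPeelStep (layer, rest) p = (layer, rest ++ [p]) := by
        simp [pvPeelStep, hc]
      rw [hstep]
      obtain ⟨L, R, heq, hperm⟩ := ih layer (rest ++ [p])
      refine ⟨L, p :: R, by rw [heq]; simp, ?_⟩
      exact List.Perm.trans List.perm_middle (List.Perm.cons p hperm)

-- the dict in B's inner loop tracks the peeled layer
theorem pvBInner (br : Char × Char) :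
    ∀ (todo : List (Int × Int)) (d : PySem.Dict (Int × Int) (Char × Char))
      (layer rest : List (Int × Int)),
      d.keys.Nodup → todo.Nodup → (∀ p ∈ todo, d.contains p = false) →
      (todo.foldl (pvBStep br) (d, layer, rest)).2 = todo.foldl pvPeelStep (layer, rest)
      ∧ ∃ L, (todo.foldl pvPeelStep (layer, rest)).1 = layer ++ L
          ∧ (todo.foldl (pvBStep br) (d, layer, rest)).1.items
              = d.items ++ L.map (fun p => (p, br)) := by
  intro todo
  induction todo with
  | nil => intro d layer rest _ _ _; exact ⟨rfl, [], by simp, by simp⟩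
  | cons p t ih =>
    intro d layer rest hk hnd hfresh
    rw [List.foldl_cons, List.foldl_cons]
    have hfresh' : ∀ q ∈ t, d.contains q = false :=
      fun q hq => hfresh q (List.mem_cons_of_mem _ hq)
    cases hc : layer.any (fun q => pvCross p q)
    · have hstepB : pvBStep br (d, layer, rest) p = (d.insert p br, layer ++ [p], rest) := by
        simp [pvBStep, hc]
      have hstepP : pvPeelStep (layer, rest) p = (layer ++ [p], rest) := by
        simp [pvPeelStep, hc]
      rw [hstepB, hstepP]
      have hnc : d.contains p = false := hfresh p List.mem_cons_self
      have hfresh2 : ∀ q ∈ t, (d.insert p br).contains q = false := by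
        intro q hq
        rw [PySem.Dict.contains_insert]
        have hqp : (q == p) = false := by
          simp only [beq_eq_false_iff_ne]
          exact fun hqp => (List.nodup_cons.mp hnd).1 (hqp ▸ hq)
        rw [hqp, hfresh' q hq]; rfl
      obtain ⟨h1, L, h2, h3⟩ := ih (d.insert p br) (layer ++ [p]) rest
        (PySem.Dict.nodup_keys_insert d p br hk) (List.nodup_cons.mp hnd).2 hfresh2
      refine ⟨h1, p :: L, by rw [h2]; simp, ?_⟩
      rw [h3, PySem.Dict.items_insert_of_not_contains d br hnc]
      simp
    · have hstepB : pvBStep br (d, layer, rest) p = (d, layer, rest ++ [p]) := by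
        simp [pvBStep, hc]
      have hstepP : pvPeelStep (layer, rest) p = (layer, rest ++ [p]) := by
        simp [pvPeelStep, hc]
      rw [hstepB, hstepP]
      exact ih d layer (rest ++ [p]) hk (List.nodup_cons.mp hnd).2 hfresh'

-- THE CRUX: first-fit greedy over (b0 :: bs') = one peel + greedy over bs' on the rest
theorem pvGreedyPeel (b0 : Char × Char) (bs' : List (Char × Char)) (hb : b0 ∉ bs') :
    ∀ (todo : List (Int × Int)) (asg : List ((Int × Int) × (Char × Char)))
      (layer rest : List (Int × Int)),
      layer = (asg.filter (fun e => e.2 == b0)).map Prod.fst →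
      asg.filter (fun e => !(e.2 == b0)) = rest.foldl (pvGStep bs') [] →
      (todo.foldl pvPeelStep (layer, rest)).1
          = ((todo.foldl (pvGStep (b0 :: bs')) asg).filter (fun e => e.2 == b0)).map Prod.fst
      ∧ (todo.foldl (pvGStep (b0 :: bs')) asg).filter (fun e => !(e.2 == b0))
          = (todo.foldl pvPeelStep (layer, rest)).2.foldl (pvGStep bs') [] := by
  intro todo
  induction todo with
  | nil =>
    intro asg layer rest h1 h2
    simp only [List.foldl_nil]
    exact ⟨h1, h2⟩
  | cons p t ih =>
    intro asg layer rest h1 h2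
    rw [List.foldl_cons, List.foldl_cons]
    have hlayer : layer.any (fun q => pvCross p q)
        = asg.any (fun e => pvCross p e.1 && e.2 == b0) := by
      rw [h1]; exact pvLayerAny asg p b0
    cases hc0 : asg.any (fun e => pvCross p e.1 && e.2 == b0)
    · -- b0 is free: greedy takes b0, the peel takes p into the layer
      have hg : pvGStep (b0 :: bs') asg p = asg ++ [(p, b0)] := by
        simp only [pvGStep, List.find?_cons, hc0]; rfl
      have hp : pvPeelStep (layer, rest) p = (layer ++ [p], rest) := by
        simp [pvPeelStep, hlayer, hc0]
      rw [hg, hp]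
      apply ih
      · rw [List.filter_append, h1]
        simp
      · rw [List.filter_append, h2]
        simp
    · -- b0 conflicts: greedy continues with bs' against the b0-free entries = the rest greedy
      have hp : pvPeelStep (layer, rest) p = (layer, rest ++ [p]) := by
        simp [pvPeelStep, hlayer, hc0]
      have hconv : ∀ b ∈ bs',
          asg.any (fun e => pvCross p e.1 && e.2 == b)
            = (rest.foldl (pvGStep bs') []).any (fun e => pvCross p e.1 && e.2 == b) := by
        intro b hbmem
        rw [← h2, pvAny_filter_of]
        intro e _ hqe
        have heb : e.2 = b0 := by
          have := (Bool.not_eq_true' _).symm ▸ hqe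
          simpa using this
        have hbne : (e.2 == b) = false := by
          simp only [beq_eq_false_iff_ne, heb]
          exact fun hbb => hb (hbb ▸ hbmem)
        rw [hbne, Bool.and_false]
      have hfind : (b0 :: bs').find? (fun b => ! asg.any (fun e => pvCross p e.1 && e.2 == b))
          = bs'.find? (fun b => ! (rest.foldl (pvGStep bs') []).any
              (fun e => pvCross p e.1 && e.2 == b)) := by
        rw [List.find?_cons, hc0]
        exact pvFind?_congr _ _ _ (fun b hbm => by rw [hconv b hbm])
      have hrest : (rest ++ [p]).foldl (pvGStep bs') []
          = pvGStep bs' (rest.foldl (pvGStep bs') []) p := by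
        rw [List.foldl_append]; rfl
      rcases hf : bs'.find? (fun b => ! (rest.foldl (pvGStep bs') []).any
          (fun e => pvCross p e.1 && e.2 == b)) with _ | b
      · have hg : pvGStep (b0 :: bs') asg p = asg := by
          simp only [pvGStep, hfind, hf]
        have hg2 : pvGStep bs' (rest.foldl (pvGStep bs') []) p
            = rest.foldl (pvGStep bs') [] := by
          simp only [pvGStep, hf]
        rw [hg, hp]
        apply ih
        · exact h1
        · rw [h2, hrest, hg2]
      · have hbmem : b ∈ bs' := List.mem_of_find?_eq_some hf
        have hbne : (b == b0) = false := by
          simp only [beq_eq_false_iff_ne]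
          exact fun hbb => hb (hbb ▸ hbmem)
        have hg : pvGStep (b0 :: bs') asg p = asg ++ [(p, b)] := by
          simp only [pvGStep, hfind, hf]
        have hg2 : pvGStep bs' (rest.foldl (pvGStep bs') []) p
            = rest.foldl (pvGStep bs') [] ++ [(p, b)] := by
          simp only [pvGStep, hf]
        rw [hg, hp]
        apply ih
        · rw [List.filter_append, h1]
          simp [hbne]
        · rw [List.filter_append, h2, hrest, hg2]
          simp [hbne]

theorem pvFoldlGStepNil : ∀ (l : List (Int × Int)) (asg : List ((Int × Int) × (Char × Char))),
    l.foldl (pvGStep []) asg = asg := by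
  intro l
  induction l with
  | nil => intro asg; rfl
  | cons p t ih => intro asg; rw [List.foldl_cons]; exact ih asg

theorem pvNotMemKeys (d : PySem.Dict (Int × Int) (Char × Char)) (p : Int × Int)
    (h : d.contains p = false) : p ∉ d.keys := by
  intro hm
  rw [(PySem.Dict.contains_iff_mem_keys d p).mpr hm] at h
  cases h

theorem pvContainsFalse (d : PySem.Dict (Int × Int) (Char × Char)) (p : Int × Int)
    (h : p ∉ d.keys) : d.contains p = false := by
  cases hc : d.contains p
  · rfl
  · exact absurd ((PySem.Dict.contains_iff_mem_keys d p).mp hc) h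

-- B's outer loop computes (as a map) exactly the list-level greedy over the full bracket list
theorem pvOuterEq :
    ∀ (bs : List (Char × Char)), bs.Nodup →
    ∀ (rem : List (Int × Int)), rem.Nodup →
    ∀ (d : PySem.Dict (Int × Int) (Char × Char)), d.keys.Nodup →
      (∀ p ∈ rem, d.contains p = false) →
      (bs.foldl pvOuter (d, rem)).1.keys.Nodup
      ∧ (∀ p ∈ rem, (bs.foldl pvOuter (d, rem)).1.get? p
            = List.lookup p (rem.foldl (pvGStep bs) []))
      ∧ (∀ p, p ∉ rem → (bs.foldl pvOuter (d, rem)).1.get? p = d.get? p) := by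
  intro bs
  induction bs with
  | nil =>
    intro _ rem _ d hk hfresh
    refine ⟨hk, ?_, fun p _ => rfl⟩
    intro p hp
    rw [pvFoldlGStepNil, pvLookup_none]
    · exact (PySem.Dict.get?_eq_none_iff_contains d p).mpr (hfresh p hp)
    · simp
  | cons b0 bs' ih =>
    intro hbnd rem hrnd d hk hfresh
    have hb0 : b0 ∉ bs' := (List.nodup_cons.mp hbnd).1
    have hbs' : bs'.Nodup := (List.nodup_cons.mp hbnd).2
    obtain ⟨L, R, hpeel, hperm⟩ := pvPeelPerm rem [] []
    simp only [List.nil_append] at hpeel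
    obtain ⟨hinner2, L', hL', hitems⟩ := pvBInner b0 rem d [] [] hk hrnd hfresh
    rw [hpeel] at hinner2 hL'
    simp only [List.nil_append] at hL'
    subst hL'
    have hLRnd : (L ++ R).Nodup := hperm.nodup_iff.mpr hrnd
    have hLmem : ∀ x ∈ L, x ∈ rem := fun x hx => hperm.mem_iff.mp (List.mem_append.mpr (.inl hx))
    have hRmem : ∀ x ∈ R, x ∈ rem := fun x hx => hperm.mem_iff.mp (List.mem_append.mpr (.inr hx))
    have hdisj : ∀ x ∈ R, x ∉ L := fun x hx hxL =>
      (List.disjoint_of_nodup_append hLRnd) hxL hx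
    set d1 := (rem.foldl (pvBStep b0) (d, ([] : List (Int × Int)), ([] : List (Int × Int)))).1 with hd1
    have hkeys1 : d1.keys = d.keys ++ L := by
      show d1.items.map Prod.fst = d.items.map Prod.fst ++ L
      rw [hitems, List.map_append, List.map_map]
      rw [show (Prod.fst ∘ fun p : Int × Int => (p, b0)) = id from rfl, List.map_id]
    have hnk1 : d1.keys.Nodup := by
      rw [hkeys1, List.nodup_append]
      refine ⟨hk, (List.nodup_append.mp hLRnd).1, ?_⟩
      intro x hxk y hyL hxy
      subst hxy
      exact pvNotMemKeys d x (hfresh x (hLmem x hyL)) hxk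
    have hfresh1 : ∀ p ∈ R, d1.contains p = false := by
      intro p hp
      apply pvContainsFalse
      rw [hkeys1]
      intro hmem
      rcases List.mem_append.mp hmem with h | h
      · exact pvNotMemKeys d p (hfresh p (hRmem p hp)) h
      · exact hdisj p hp h
    have houter : pvOuter (d, rem) b0 = (d1, R) := by
      show ((rem.foldl (pvBStep b0) (d, [], [])).1, (rem.foldl (pvBStep b0) (d, [], [])).2.2) = _
      rw [hinner2]
    obtain ⟨ih1, ih2, ih3⟩ := ih hbs' R (List.nodup_append.mp hLRnd).2.1 d1 hnk1 hfresh1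
    obtain ⟨hgp1, hgp2⟩ := pvGreedyPeel b0 bs' hb0 rem [] [] [] (by simp) (by simp)
    rw [hpeel] at hgp1 hgp2
    replace hgp1 : L = ((rem.foldl (pvGStep (b0 :: bs')) []).filter
        (fun e => e.2 == b0)).map Prod.fst := hgp1
    replace hgp2 : (rem.foldl (pvGStep (b0 :: bs')) []).filter (fun e => !(e.2 == b0))
        = R.foldl (pvGStep bs') [] := hgp2
    set gAll := rem.foldl (pvGStep (b0 :: bs')) [] with hgAll
    have hgknd : (gAll.map Prod.fst).Nodup :=
      List.Nodup.sublist (by simpa using pvGKeys (b0 :: bs') rem []) hrnd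
    rw [List.foldl_cons, houter]
    refine ⟨ih1, ?_, ?_⟩
    · intro p hp
      rcases List.mem_append.mp (hperm.mem_iff.mpr hp) with hpL | hpR
      · -- p got bracket b0 in this layer
        have hpnR : p ∉ R := fun hpR => hdisj p hpR hpL
        rw [ih3 p hpnR]
        have hmem : (p, b0) ∈ gAll := by
          rw [hgp1] at hpL
          obtain ⟨e, he, hfst⟩ := List.mem_map.mp hpL
          have heb : e.2 = b0 := by simpa using (List.mem_filter.mp he).2
          have : e = (p, b0) := by
            obtain ⟨e1, e2⟩ := e
            simp only at hfst heb
            rw [hfst, heb]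
          exact this ▸ (List.mem_filter.mp he).1
        rw [pvLookup_of_mem gAll p b0 hmem hgknd]
        apply PySem.Dict.get?_of_mem_items d1 _ hnk1
        rw [hitems]
        exact List.mem_append.mpr (.inr (List.mem_map.mpr ⟨p, hpL, rfl⟩))
      · -- p is handled by the later layers
        rw [ih2 p hpR, ← hgp2, pvLookup_filter]
        intro c hc
        simp only [Bool.not_eq_eq_eq_not, Bool.not_true, beq_eq_false_iff_ne]
        intro hcb
        subst hcb
        refine hdisj p hpR ?_
        rw [hgp1]
        exact List.mem_map.mpr ⟨(p, c), List.mem_filter.mpr ⟨hc, by simp⟩, rfl⟩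
    · intro p hp
      have hpnR : p ∉ R := fun h => hp (hRmem p h)
      have hpnL : p ∉ L := fun h => hp (hLmem p h)
      rw [ih3 p hpnR]
      rcases hdp : d.get? p with _ | v
      · apply (PySem.Dict.get?_eq_none_iff_not_mem_keys d1 p).mpr
        rw [hkeys1]
        intro hmem
        rcases List.mem_append.mp hmem with h | h
        · exact ((PySem.Dict.get?_eq_none_iff_not_mem_keys d p).mp hdp) h
        · exact hpnL h
      · apply PySem.Dict.get?_of_mem_items d1 _ hnk1
        rw [hitems]
        exact List.mem_append.mpr (.inl (PySem.Dict.mem_items_of_get?_eq_some d hdp))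

-- the two fill loops write the same characters
theorem pvFillEq (dB : PySem.Dict (Int × Int) (Char × Char)) :
    ∀ (ps : List (Int × Int)) (asg : List ((Int × Int) × (Char × Char))) (dbn : List Char),
      ps.Nodup → (asg.map Prod.fst).Sublist ps →
      (∀ p ∈ ps, dB.get? p = List.lookup p asg) →
      ps.foldl (pvFillStep dB) dbn = pvFill asg dbn := by
  intro ps
  induction ps with
  | nil =>
    intro asg dbn _ hsub _
    have : asg = [] := by
      cases asg with
      | nil => rfl
      | cons e t => cases (List.sublist_nil.mp hsub)
    rw [this]; rfl
  | cons p t ih =>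
    intro asg dbn hnd hsub hlook
    rw [List.foldl_cons]
    have hred : pvFillStep dB dbn p
        = match dB.get? p with
          | some b => PySem.List.pySetD (PySem.List.pySetD dbn p.1 b.1) p.2 b.2
          | none => dbn := rfl
    rw [hred, hlook p List.mem_cons_self]
    have hpt : p ∉ t := (List.nodup_cons.mp hnd).1
    cases asg with
    | nil =>
      simp only [List.lookup]
      exact ih [] _ (List.nodup_cons.mp hnd).2 (List.nil_sublist _)
        (fun q hq => by rw [hlook q (List.mem_cons_of_mem _ hq)])
    | cons e asg' =>
      obtain ⟨k, v⟩ := e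
      by_cases hkp : p = k
      · subst hkp
        have hsub' : (asg'.map Prod.fst).Sublist t := by
          have h2 := hsub
          simp only [List.map_cons] at h2
          exact List.cons_sublist_cons.mp h2
        have hlk : List.lookup p (((p, v)) :: asg') = some v := by
          simp [List.lookup]
        rw [hlk]
        show _ = pvFill asg' _
        apply ih asg' _ (List.nodup_cons.mp hnd).2 hsub'
        intro q hq
        rw [hlook q (List.mem_cons_of_mem _ hq)]
        have hqp : (q == p) = false := by
          simp only [beq_eq_false_iff_ne]
          exact fun h => hpt (h ▸ hq)
        simp [List.lookup, hqp]
      · have hsub' : (((k, v) :: asg').map Prod.fst).Sublist t := by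
          have h2 := hsub
          simp only [List.map_cons] at h2 ⊢
          exact List.Sublist.of_cons_of_ne (fun h => hkp h.symm) h2
        have hpk : p ∉ ((k, v) :: asg').map Prod.fst := fun hm => hpt (hsub'.mem hm)
        rw [pvLookup_none _ _ hpk]
        exact ih _ _ (List.nodup_cons.mp hnd).2 hsub'
          (fun q hq => hlook q (List.mem_cons_of_mem _ hq))

-- ===== VERDICT (by name: the statement is the Claim_ definition above) =====
set_option maxHeartbeats 2000000 in
theorem matrix_to_dbn_spec : Claim_equal_matrix_to_dbn := by
  intro m _ _
  unfold Spec_matrix_to_dbn matrix_to_dbn matrix_to_dbn_alt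
  have hnd := pvPairList_nodup m
  have hA : ((pvPairList m).foldl (pvStepA pvBrackets (pvPairList m)) PySem.Dict.empty).items
      = (pvPairList m).foldl (pvGStep pvBrackets) [] :=
    pvAEq (pvPairList m) (pvPairList m) PySem.Dict.empty hnd (fun _ h => h)
      PySem.Dict.nodup_keys_empty (fun e he => absurd he List.not_mem_nil) (fun _ _ => by simp)
  obtain ⟨-, hlook, -⟩ := pvOuterEq pvBrackets (by decide) (pvPairList m) hnd
      PySem.Dict.empty PySem.Dict.nodup_keys_empty (fun p _ => by simp)
  have hfill := pvFillEq ((pvBrackets.foldl pvOuter (PySem.Dict.empty, pvPairList m)).1)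
      (pvPairList m) ((pvPairList m).foldl (pvGStep pvBrackets) [])
      (List.replicate (PySem.List.len m).toNat '.') hnd
      (by simpa using pvGKeys pvBrackets (pvPairList m) [])
      (fun p hp => by rw [hlook p hp])
  show String.ofList (pvFill
        (find_non_conflicting_brackets (pvPairList m) pvBrackets).items
        (List.replicate (PySem.List.len m).toNat '.'))
      = String.ofList ((pvPairList m).foldl
          (pvFillStep (pvBrackets.foldl pvOuter (PySem.Dict.empty, pvPairList m)).1)
          (List.replicate (PySem.List.len m).toNat '.'))
  rw [hfill]
  unfold find_non_conflicting_brackets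
  rw [hA]
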